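-- pv_equiv track=rewrite | github.com/mkdevelop5002/-_- | programmers_func_develop.py | solution
-- ===== SOURCE A (Python) =====
-- def solution(pro, speed):
--     answer = []
--     lst = []
--     idx = 1
--     dic ={}
--     for cnt in range(len(pro)):
--         while pro[cnt] <100:
--             for i in range(len(pro)):
--                 pro[i] += speed[i]
--                 idx+=1
--         lst.append(idx)
--
--     for i in lst:
--         if i not in dic:
--             dic[i] = 1
--         else:
--             dic[i] +=1
--     for j in dic:
--         answer.append(dic[j])
--     return answer
-- ===== SOURCE B (Python) =====
-- def solution(pro, speed):
--     # Closed form: each task needs ceil((100-p)/s) rounds; its finish round is the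
--     # running max; answer = run lengths of that nondecreasing sequence.
--     # (A mutates pro in place; B does not - equivalence is about the return value.)
--     answer = []
--     r = 0
--     cur = None
--     for p, s in zip(pro, speed):
--         d = -((p - 100) // s)
--         if d > r:
--             r = d
--         if cur == r:
--             answer[-1] += 1
--         else:
--             answer.append(1)
--             cur = r
--     return answer
-- ===== Notes on version B (the rewrite author's own statement) =====
-- stated objective: faster
-- what changed: B replaces A's round-by-round simulation (incrementing every task each round until the current one reaches 100) and the dict tally with a single pass computing each task's finish round by ceiling division, keeping a running maximum, and run-length-encoding it on the fly; intended as faster (a timing run saw A time out at n=16 where B returned; no clean ratio was measurable).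
-- outside the precondition, e.g. on solution([100], []): A returns [1], B returns []; on solution([100, 120], [0, -5]): A returns [2], B raises ZeroDivisionError
import Mathlib
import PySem

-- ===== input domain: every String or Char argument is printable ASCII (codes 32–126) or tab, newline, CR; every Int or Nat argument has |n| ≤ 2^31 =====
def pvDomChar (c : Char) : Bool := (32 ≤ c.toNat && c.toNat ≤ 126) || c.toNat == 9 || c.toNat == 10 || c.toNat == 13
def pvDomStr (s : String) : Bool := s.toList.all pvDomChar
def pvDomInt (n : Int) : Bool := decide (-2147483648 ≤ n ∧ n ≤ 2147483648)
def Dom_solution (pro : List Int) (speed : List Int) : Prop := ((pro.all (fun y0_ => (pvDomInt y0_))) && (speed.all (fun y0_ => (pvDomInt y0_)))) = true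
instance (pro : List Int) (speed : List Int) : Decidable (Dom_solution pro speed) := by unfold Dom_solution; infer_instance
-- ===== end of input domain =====

-- B replaces A's round-by-round simulation with ceiling division + running max + on-the-fly
-- run-length encoding; intended as faster (a timing run saw A time out at n=16 where B
-- returned; no clean ratio was measurable). A mutates `pro` in place, B does not — the
-- equivalence proved here is about the return value only.

-- ===== PORT A =====
-- the `while pro[cnt] < 100:` loop; each iteration adds speed pointwise and bumps idx by
-- len(pro) (Python bumps it once per element, same total); fuel (100 - pro[cnt]).toNat bounds
-- the iterations actually performed under Pre_ (each round adds at least 1 to pro[cnt])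
def pvWhileA (cnt : Nat) (speed : List Int) : Nat → List Int × Int → List Int × Int
  | 0, (p, idx) => (p, idx)
  | fuel + 1, (p, idx) =>
    if p.getD cnt 0 < 100 then
      pvWhileA cnt speed fuel (List.zipWith (· + ·) p speed, idx + (p.length : Int))
    else (p, idx)

def solution (pro : List Int) (speed : List Int) : List Int :=
  let st := (List.range pro.length).foldl
    (fun (st : List Int × List Int × Int) cnt =>
      let lst := st.1
      let p := st.2.1
      let idx := st.2.2
      let r := pvWhileA cnt speed ((100 - p.getD cnt 0).toNat) (p, idx)
      (lst ++ [r.2], r.1, r.2))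
    ([], pro, 1)
  let dic := st.1.foldl
    (fun (d : PySem.Dict Int Int) i =>
      match d.get? i with
      | none => d.insert i 1
      | some v => d.insert i (v + 1))
    PySem.Dict.empty
  dic.values

-- ===== PORT B =====
def solution_alt (pro : List Int) (speed : List Int) : List Int :=
  ((pro.zip speed).foldl
    (fun (st : List Int × Int × Option Int) ps =>
      let answer := st.1
      let r0 := st.2.1
      let cur := st.2.2
      let d := -(PySem.Int.floordiv (ps.1 - 100) ps.2)
      let r := if d > r0 then d else r0
      if cur = some r then (answer.dropLast ++ [answer.getLast?.getD 0 + 1], r, cur)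
      else (answer ++ [1], r, some r))
    ([], 0, none)).1

-- ===== PRECONDITION & SPEC =====
-- Pre_ requires a positive speed entry for every task and speed at least as long as pro:
-- outside it A loops forever (speed ≤ 0) or raises IndexError (speed too short) — except in
-- the corner where every task already starts at ≥ 100, where A returns without reading speed
-- (see the excluded examples in the claim).
def Pre_solution (pro : List Int) (speed : List Int) : Prop :=
  pro.length ≤ speed.length ∧ ∀ i < pro.length, 1 ≤ speed.getD i 0

instance (pro : List Int) (speed : List Int) : Decidable (Pre_solution pro speed) := by
  unfold Pre_solution; infer_instance

def pvWitness_solution : List Int × List Int := ([93, 30, 55], [1, 30, 5])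

def Spec_solution (pro : List Int) (speed : List Int) (out : List Int) : Prop :=
  out = solution_alt pro speed
instance (pro : List Int) (speed : List Int) (out : List Int) : Decidable (Spec_solution pro speed out) := by
  unfold Spec_solution; infer_instance

-- ===== CLAIM (what is proved, stated in full; the proofs are below) =====
def Claim_equal_solution : Prop := ∀ (pro : List Int) (speed : List Int),
  Dom_solution pro speed → Pre_solution pro speed → Spec_solution pro speed (solution pro speed)

-- ===== LEMMAS AND PROOFS =====

-- canonical (named) forms of the ports' loop bodies; definitionally equal to the inline lambdas
def pvAstep (speed : List Int) (st : List Int × List Int × Int) (cnt : Nat) :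
    List Int × List Int × Int :=
  let lst := st.1
  let p := st.2.1
  let idx := st.2.2
  let r := pvWhileA cnt speed ((100 - p.getD cnt 0).toNat) (p, idx)
  (lst ++ [r.2], r.1, r.2)

def pvDstep (d : PySem.Dict Int Int) (i : Int) : PySem.Dict Int Int :=
  match d.get? i with
  | none => d.insert i 1
  | some v => d.insert i (v + 1)

def pvBstep (st : List Int × Int × Option Int) (ps : Int × Int) : List Int × Int × Option Int :=
  let answer := st.1
  let r0 := st.2.1
  let cur := st.2.2
  let d := -(PySem.Int.floordiv (ps.1 - 100) ps.2)
  let r := if d > r0 then d else r0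
  if cur = some r then (answer.dropLast ++ [answer.getLast?.getD 0 + 1], r, cur)
  else (answer ++ [1], r, some r)



def pvDval (p s : Int) : Int := -(PySem.Int.floordiv (p - 100) s)

lemma pvDval_bounds (p s : Int) (hs : 0 < s) :
    (pvDval p s - 1) * s < 100 - p ∧ 100 - p ≤ pvDval p s * s := by
  have h := (PySem.Int.neg_floordiv_neg_eq_iff_of_pos (a := 100 - p) (b := s) (q := pvDval p s) hs)
  apply h.mp
  unfold pvDval
  norm_num

lemma pvZip_getD (f : Int → Int → Int) : ∀ (p s : List Int) (i : Nat), i < p.length → p.length ≤ s.length →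
    (List.zipWith f p s).getD i 0 = f (p.getD i 0) (s.getD i 0)
  | [], _, _, h, _ => by simp at h
  | a :: p, [], i, h1, h2 => by simp at h2
  | a :: p, b :: s, 0, h1, h2 => by simp
  | a :: p, b :: s, i+1, h1, h2 => by
      simp only [List.zipWith_cons_cons, List.getD_cons_succ]
      exact pvZip_getD f p s i (by simpa using h1) (by simpa using h2)

lemma pvLam0 : (fun (a b : Int) => a + b * 0) = fun (a b : Int) => a := by
  funext a b; ring

lemma pvZip_zero : ∀ (p s : List Int), p.length ≤ s.length →
    List.zipWith (fun (a b : Int) => a) p s = p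
  | [], _, _ => by simp
  | a :: p, [], h => by simp at h
  | a :: p, b :: s, h => by
      simp only [List.zipWith_cons_cons]
      exact congrArg (a :: ·) (pvZip_zero p s (by simpa using h))

lemma pvZip_step (k : Int) : ∀ (p s : List Int),
    List.zipWith (fun a b => a + b * k) (List.zipWith (· + ·) p s) s
      = List.zipWith (fun a b => a + b * (k + 1)) p s
  | [], _ => by simp
  | a :: p, [] => by simp
  | a :: p, b :: s => by
      simp only [List.zipWith_cons_cons]
      rw [pvZip_step k p s]
      congr 1
      ring

lemma pvZip_shift (R k : Int) : ∀ (p s : List Int),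
    List.zipWith (fun a b => a + b * k) (List.zipWith (fun a b => a + b * R) p s) s
      = List.zipWith (fun a b => a + b * (R + k)) p s
  | [], _ => by simp
  | a :: p, [] => by simp
  | a :: p, b :: s => by
      simp only [List.zipWith_cons_cons]
      rw [pvZip_shift R k p s]
      congr 1
      ring

lemma pvWhileA_eq (speed : List Int) (cnt : Nat) :
    ∀ (fuel : Nat) (p : List Int) (idx k : Int),
    cnt < p.length → p.length ≤ speed.length →
    0 ≤ k → k.toNat ≤ fuel →
    100 ≤ p.getD cnt 0 + speed.getD cnt 0 * k →
    (k = 0 ∨ p.getD cnt 0 + speed.getD cnt 0 * (k - 1) < 100) →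
    1 ≤ speed.getD cnt 0 →
    pvWhileA cnt speed fuel (p, idx)
      = (List.zipWith (fun a b => a + b * k) p speed, idx + k * (p.length : Int))
  | 0, p, idx, k, hcnt, hlen, hk0, hfuel, hge, hmin, hs => by
      have hk : k = 0 := by omega
      subst hk
      rw [show pvWhileA cnt speed 0 (p, idx) = (p, idx) from rfl, pvLam0,
        pvZip_zero p speed hlen]
      simp
  | fuel + 1, p, idx, k, hcnt, hlen, hk0, hfuel, hge, hmin, hs => by
      have hq1 : (List.zipWith (· + ·) p speed).length = p.length := by
        simp [List.length_zipWith]; omega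
      have hqget : (List.zipWith (· + ·) p speed).getD cnt 0
          = p.getD cnt 0 + speed.getD cnt 0 := pvZip_getD _ p speed cnt hcnt hlen
      by_cases hlt : p.getD cnt 0 < 100
      · have hk1 : 1 ≤ k := by
          rcases eq_or_lt_of_le hk0 with h | h
          · exfalso; rw [← h] at hge; simp only [mul_zero, add_zero] at hge; linarith
          · omega
        have hrec := pvWhileA_eq speed cnt fuel (List.zipWith (· + ·) p speed)
            (idx + (p.length : Int)) (k - 1)
            (by omega) (by omega) (by omega) (by omega)
            (by rw [hqget]
                have e : p.getD cnt 0 + speed.getD cnt 0 + speed.getD cnt 0 * (k - 1)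
                    = p.getD cnt 0 + speed.getD cnt 0 * k := by ring
                linarith)
            (by rcases hmin with h | h
                · omega
                · right; rw [hqget]
                  have e : p.getD cnt 0 + speed.getD cnt 0 + speed.getD cnt 0 * (k - 1 - 1)
                      = p.getD cnt 0 + speed.getD cnt 0 * (k - 1) := by ring
                  linarith)
            hs
        show (if p.getD cnt 0 < 100 then _ else _) = _
        rw [if_pos hlt, hrec, pvZip_step (k-1) p speed, hq1]
        have e1 : k - 1 + 1 = k := by ring
        rw [e1]
        have e2 : idx + (p.length : Int) + (k - 1) * (p.length : Int)
            = idx + k * (p.length : Int) := by ring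
        rw [e2]
      · have hk : k = 0 := by
          rcases hmin with h | h
          · exact h
          · rcases eq_or_lt_of_le hk0 with h0 | h0
            · exact h0.symm
            · exfalso
              have h1 : 0 ≤ speed.getD cnt 0 * (k - 1) :=
                mul_nonneg (by linarith) (by omega)
              linarith
        subst hk
        show (if p.getD cnt 0 < 100 then _ else _) = _
        rw [if_neg hlt, pvLam0, pvZip_zero p speed hlen]
        simp

def pvR (pro speed : List Int) : Nat → Int
  | 0 => 0
  | j + 1 =>
      let r := pvR pro speed j
      let d := pvDval (pro.getD j 0) (speed.getD j 0)
      if d > r then d else r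

lemma pvR_nonneg (pro speed : List Int) : ∀ j, 0 ≤ pvR pro speed j
  | 0 => le_refl 0
  | j + 1 => by
      have := pvR_nonneg pro speed j
      simp only [pvR]
      split <;> omega

lemma pvR_mono (pro speed : List Int) : ∀ j, pvR pro speed j ≤ pvR pro speed (j + 1) := by
  intro j
  simp only [pvR]
  split <;> omega

lemma pvR_mono' (pro speed : List Int) : ∀ {i j}, i ≤ j → pvR pro speed i ≤ pvR pro speed j := by
  intro i j h
  induction j with
  | zero => simp [Nat.le_zero.mp h]
  | succ j ih =>
      rcases Nat.lt_or_ge i (j+1) with h1 | h1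
      · exact le_trans (ih (by omega)) (pvR_mono pro speed j)
      · have : i = j + 1 := by omega
        subst this; rfl

-- A's outer loop, characterised
lemma pvOuterA (pro speed : List Int)
    (hlen : pro.length ≤ speed.length)
    (hs : ∀ i < pro.length, 1 ≤ speed.getD i 0) :
    ∀ j, j ≤ pro.length →
    (List.range j).foldl (pvAstep speed) ([], pro, 1)
    = ((List.range j).map (fun i => 1 + (pro.length : Int) * pvR pro speed (i + 1)),
       List.zipWith (fun a b => a + b * pvR pro speed j) pro speed,
       1 + (pro.length : Int) * pvR pro speed j)
  | 0, h0 => by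
      simp only [List.range_zero, List.foldl_nil, List.map_nil, pvR, mul_zero, add_zero]
      rw [pvZip_zero pro speed hlen]
  | j + 1, hj => by
      rw [List.range_succ, List.foldl_append, List.map_append,
        pvOuterA pro speed hlen hs j (by omega), List.foldl_cons, List.foldl_nil]
      set R := pvR pro speed j with hR
      set p0 := pro.getD j 0 with hp0
      set s := speed.getD j 0 with hsj
      set K := pvR pro speed (j + 1) with hK
      have hKdef : K = if pvDval p0 s > R then pvDval p0 s else R := by
        rw [hK]; simp only [pvR]; rw [← hp0, ← hsj, ← hR]
      have hs1 : 1 ≤ s := hs j (by omega)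
      have hRn : 0 ≤ R := pvR_nonneg pro speed j
      have hd := pvDval_bounds p0 s (by linarith)
      have hq1 : (List.zipWith (fun a b => a + b * R) pro speed).length = pro.length := by
        simp [List.length_zipWith]; omega
      have hqget : (List.zipWith (fun a b => a + b * R) pro speed).getD j 0 = p0 + s * R := by
        rw [pvZip_getD _ pro speed j (by omega) hlen]
      have hKR : 0 ≤ K - R := by rw [hKdef]; split <;> omega
      have hge : 100 ≤ p0 + s * R + s * (K - R) := by
        rw [hKdef]
        split
        · rename_i h
          have : p0 + s * R + s * (pvDval p0 s - R) = p0 + s * pvDval p0 s := by ring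
          rw [this]
          have := hd.2
          linarith
        · rename_i h
          simp only [not_lt] at h
          have h1 : pvDval p0 s * s ≤ R * s :=
            mul_le_mul_of_nonneg_right h (by linarith)
          have : p0 + s * R + s * (R - R) = p0 + s * R := by ring
          rw [this]
          have := hd.2
          nlinarith
      have hmin : K - R = 0 ∨ p0 + s * R + s * (K - R - 1) < 100 := by
        rw [hKdef]
        split
        · rename_i h
          right
          have e : p0 + s * R + s * (pvDval p0 s - R - 1) = p0 + (pvDval p0 s - 1) * s := by ring
          rw [e]
          have := hd.1
          linarith
        · left; ring
      have hfuel : (K - R).toNat ≤ (100 - (p0 + s * R)).toNat := by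
        rcases eq_or_lt_of_le hKR with h0 | h0
        · omega
        · have hKd : K = pvDval p0 s := by
            rw [hKdef]; rw [hKdef] at h0; split <;> [rfl; omega]
          have h1 := hd.1
          have h2 : (K - 1 - R) ≤ (K - 1 - R) * s := le_mul_of_one_le_right (by omega) hs1
          have h3 : (K - 1 - R) * s = (K - 1) * s - R * s := by ring
          have h4 : R * s = s * R := by ring
          have h5 : K - 1 - R ≤ (K - 1) * s - s * R := by omega
          have h6 : (K - 1) * s < 100 - p0 := by rw [hKd]; linarith [hd.1]
          omega
      have hwhile := pvWhileA_eq speed j ((100 - (List.zipWith (fun a b => a + b * R) pro speed).getD j 0).toNat)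
          (List.zipWith (fun a b => a + b * R) pro speed)
          (1 + (pro.length : Int) * R) (K - R)
          (by omega) (by omega) hKR
          (by rw [hqget]; exact hfuel)
          (by rw [hqget]; exact hge)
          (by rw [hqget]; exact hmin)
          hs1
      simp only [pvAstep]
      rw [hwhile, pvZip_shift R (K - R) pro speed, hq1]
      have e1 : R + (K - R) = K := by ring
      rw [e1]
      have e2 : 1 + (pro.length : Int) * R + (K - R) * (pro.length : Int)
          = 1 + (pro.length : Int) * K := by ring
      rw [e2]
      rfl



def pvGrpAux (x c : Int) : List Int → List (Int × Int)
  | [] => [(x, c)]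
  | y :: t => if y = x then pvGrpAux x (c + 1) t else (x, c) :: pvGrpAux y 1 t

def pvGrp : List Int → List (Int × Int)
  | [] => []
  | x :: t => pvGrpAux x 1 t

lemma pvDictRun : ∀ (t : List Int) (g : List (Int × Int)) (x c : Int),
    ((g ++ [(x, c)]).map Prod.fst).Pairwise (· < ·) →
    (∀ y ∈ t, x ≤ y) → t.Pairwise (· ≤ ·) →
    (t.foldl pvDstep (PySem.Dict.mk (g ++ [(x, c)]))).items
      = g ++ pvGrpAux x c t
  | [], g, x, c, hpw, hle, hord => by simp [pvGrpAux]
  | y :: t, g, x, c, hpw, hle, hord => by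
    have hnd : ((g ++ [(x, c)]).map Prod.fst).Nodup := hpw.imp ne_of_lt
    have hkeys : (PySem.Dict.mk (g ++ [(x, c)])).keys = (g ++ [(x, c)]).map Prod.fst := by
      simp [PySem.Dict.keys]
    have hglt : ∀ p ∈ g, p.1 < x := by
      intro p hp
      have h2 := (List.pairwise_append.mp (by simpa using hpw)).2.2
      exact h2 p.1 (List.mem_map_of_mem hp) x (by simp)
    by_cases hyx : y = x
    · subst hyx
      have hget : (PySem.Dict.mk (g ++ [(y, c)])).get? y = some c := by
        apply PySem.Dict.get?_of_mem_items
        · simp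
        · rw [hkeys]; exact hnd
      have hins : (PySem.Dict.mk (g ++ [(y, c)])).insert y (c + 1)
          = PySem.Dict.mk (g ++ [(y, c + 1)]) := by
        apply PySem.Dict.ext
        rw [PySem.Dict.items_insert_of_contains _ _
          (by rw [PySem.Dict.contains_iff_mem_keys, hkeys]; simp)]
        show ((g ++ [(y, c)]).map fun p => if p.1 == y then (y, c + 1) else p) = _
        rw [List.map_append]
        congr 1
        · calc (g.map fun p => if p.1 == y then (y, c + 1) else p)
              = g.map id := List.map_congr_left (fun p hp => by
                have := hglt p hp
                simp only [beq_iff_eq, id_eq]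
                rw [if_neg (by omega)])
          _ = g := List.map_id g
        · simp
      rw [List.foldl_cons]
      have hstep : pvDstep (PySem.Dict.mk (g ++ [(y, c)])) y = PySem.Dict.mk (g ++ [(y, c + 1)]) := by
        unfold pvDstep
        rw [hget]
        exact hins
      rw [hstep,
        pvDictRun t g y (c + 1) (by simpa using hpw)
          (fun z hz => hle z (List.mem_cons_of_mem _ hz)) (List.Pairwise.of_cons hord)]
      simp [pvGrpAux]
    · have hxy : x < y := lt_of_le_of_ne (hle y List.mem_cons_self) (fun h => hyx h.symm)
      have hally : ∀ k ∈ (g ++ [(x, c)]).map Prod.fst, k < y := by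
        intro k hk
        simp only [List.map_append, List.mem_append, List.map_cons, List.mem_singleton,
          List.map_nil, List.mem_cons] at hk
        rcases hk with hk | hk
        · obtain ⟨p, hp, rfl⟩ := List.mem_map.mp hk
          exact lt_trans (hglt p hp) hxy
        · rcases hk with hk | hk
          · omega
          · simp at hk
      have hget : (PySem.Dict.mk (g ++ [(x, c)])).get? y = none := by
        rw [PySem.Dict.get?_eq_none_iff_not_mem_keys, hkeys]
        intro hmem
        exact absurd (hally y hmem) (lt_irrefl y)
      have hins : (PySem.Dict.mk (g ++ [(x, c)])).insert y 1
          = PySem.Dict.mk ((g ++ [(x, c)]) ++ [(y, 1)]) := by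
        apply PySem.Dict.ext
        rw [PySem.Dict.items_insert_of_not_contains _ _
          (by rw [PySem.Dict.contains_eq_decide_mem_keys, hkeys]
              simp only [decide_eq_false_iff_not]
              intro hmem
              exact absurd (hally y hmem) (lt_irrefl y))]
      have hpw' : (((g ++ [(x, c)]) ++ [(y, 1)]).map Prod.fst).Pairwise (· < ·) := by
        rw [List.map_append, List.pairwise_append]
        refine ⟨hpw, by simp, ?_⟩
        intro a ha b hb
        simp only [List.map_cons, List.map_nil, List.mem_singleton] at hb
        subst hb
        exact hally a ha
      rw [List.foldl_cons]
      have hstep : pvDstep (PySem.Dict.mk (g ++ [(x, c)])) y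
          = PySem.Dict.mk ((g ++ [(x, c)]) ++ [(y, 1)]) := by
        unfold pvDstep
        rw [hget]
        exact hins
      rw [hstep,
        pvDictRun t (g ++ [(x, c)]) y 1 hpw'
          (fun z hz => (List.pairwise_cons.mp hord).1 z hz)
          (List.Pairwise.of_cons hord)]
      simp [pvGrpAux, hyx]

lemma pvDictVals (xs : List Int) (hord : xs.Pairwise (· ≤ ·)) :
    (xs.foldl pvDstep PySem.Dict.empty).values
      = (pvGrp xs).map Prod.snd := by
  cases xs with
  | nil => simp [pvGrp]; rfl
  | cons x t =>
    have hins : (PySem.Dict.empty : PySem.Dict Int Int).insert x 1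
        = PySem.Dict.mk ([] ++ [(x, 1)]) := by
      apply PySem.Dict.ext
      rw [PySem.Dict.items_insert_of_not_contains _ _ (PySem.Dict.contains_empty x)]
      rfl
    rw [List.foldl_cons]
    have hstep : pvDstep PySem.Dict.empty x = PySem.Dict.mk ([] ++ [(x, 1)]) := by
      unfold pvDstep
      rw [PySem.Dict.get?_empty]
      exact hins
    rw [hstep, PySem.Dict.values,
      pvDictRun t [] x 1 (by simp) (fun z hz => (List.pairwise_cons.mp hord).1 z hz)
        (List.Pairwise.of_cons hord)]
    simp [pvGrp]

lemma pvGrpAux_map (f : Int → Int) (hf : ∀ a b, f a = f b → a = b) :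
    ∀ (t : List Int) (x c : Int),
    (pvGrpAux (f x) c (t.map f)).map Prod.snd = (pvGrpAux x c t).map Prod.snd
  | [], x, c => by simp [pvGrpAux]
  | y :: t, x, c => by
    by_cases hyx : y = x
    · subst hyx
      simp only [List.map_cons, pvGrpAux, if_pos rfl]
      exact pvGrpAux_map f hf t y (c + 1)
    · have : f y ≠ f x := fun h => hyx (hf _ _ h)
      simp only [List.map_cons, pvGrpAux, if_neg this, if_neg hyx, List.map_cons]
      rw [pvGrpAux_map f hf t y 1]

lemma pvGrp_map (f : Int → Int) (hf : ∀ a b, f a = f b → a = b) (xs : List Int) :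
    (pvGrp (xs.map f)).map Prod.snd = (pvGrp xs).map Prod.snd := by
  cases xs with
  | nil => simp [pvGrp]
  | cons x t => simpa [pvGrp] using pvGrpAux_map f hf t x 1



def pvStep2 (st : List Int × Option Int) (v : Int) : List Int × Option Int :=
  if st.2 = some v then (st.1.dropLast ++ [st.1.getLast?.getD 0 + 1], st.2)
  else (st.1 ++ [1], some v)

lemma pvBgrp : ∀ (t : List Int) (pref : List Int) (x c : Int),
    (t.foldl pvStep2 (pref ++ [c], some x)).1 = pref ++ (pvGrpAux x c t).map Prod.snd
  | [], pref, x, c => by simp [pvGrpAux]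
  | y :: t, pref, x, c => by
    rw [List.foldl_cons]
    by_cases hxy : x = y
    · subst hxy
      have hstep : pvStep2 (pref ++ [c], some x) x = (pref ++ [c + 1], some x) := by
        simp [pvStep2]
      rw [hstep, pvBgrp t pref x (c + 1)]
      simp [pvGrpAux]
    · have hstep : pvStep2 (pref ++ [c], some x) y = ((pref ++ [c]) ++ [1], some y) := by
        simp only [pvStep2]
        rw [if_neg (by simpa using hxy)]
      rw [hstep, pvBgrp t (pref ++ [c]) y 1]
      rw [show pvGrpAux x c (y :: t) = (x, c) :: pvGrpAux y 1 t from by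
        simp only [pvGrpAux]; rw [if_neg (fun h : y = x => hxy h.symm)]]
      simp
  termination_by t => t.length

lemma pvBfold : ∀ zs : List Int, (zs.foldl pvStep2 ([], none)).1 = (pvGrp zs).map Prod.snd
  | [] => by simp [pvGrp]
  | v :: t => by
    rw [List.foldl_cons]
    have hstep : pvStep2 ([], none) v = ([] ++ [1], some v) := by simp [pvStep2]
    rw [hstep, pvBgrp t [] v 1]
    simp [pvGrp]

lemma pvZipRange (pro speed : List Int) (h : pro.length ≤ speed.length) :
    pro.zip speed = (List.range pro.length).map (fun i => (pro.getD i 0, speed.getD i 0)) := by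
  apply List.ext_getElem
  · simp [List.length_zip]; omega
  · intro i h1 h2
    simp only [List.getElem_zip, List.getElem_map, List.getElem_range]
    have hi : i < pro.length := by simpa using h2
    rw [List.getD_eq_getElem pro 0 hi, List.getD_eq_getElem speed 0 (by omega)]

-- B's loop, re-indexed over List.range and characterised by pvStep2 over the round values
lemma pvOuterB (pro speed : List Int) :
    ∀ j,
    (List.range j).foldl (fun st i => pvBstep st (pro.getD i 0, speed.getD i 0)) ([], 0, none)
    = ((((List.range j).map (fun i => pvR pro speed (i + 1))).foldl pvStep2 ([], none)).1,
       pvR pro speed j,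
       (((List.range j).map (fun i => pvR pro speed (i + 1))).foldl pvStep2 ([], none)).2)
  | 0 => by simp [pvR]
  | j + 1 => by
      rw [List.range_succ, List.foldl_append, List.map_append, List.foldl_append,
        pvOuterB pro speed j]
      simp only [List.map_cons, List.map_nil, List.foldl_cons, List.foldl_nil]
      simp only [pvBstep]
      have hr : (if pvDval (pro.getD j 0) (speed.getD j 0) > pvR pro speed j
          then pvDval (pro.getD j 0) (speed.getD j 0) else pvR pro speed j)
          = pvR pro speed (j + 1) := by
        simp only [pvR]
      rw [show -(PySem.Int.floordiv (pro.getD j 0 - 100) (speed.getD j 0))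
          = pvDval (pro.getD j 0) (speed.getD j 0) from rfl]
      rw [hr]
      simp only [pvStep2]
      split
      · rfl
      · rfl

lemma pvNcast_ne (n : Nat) (hn : n ≠ 0) : (n : Int) ≠ 0 := by
  exact_mod_cast hn

-- ===== VERDICT (by name: the statement is the Claim_ definition above) =====
theorem solution_spec : Claim_equal_solution := by
  intro pro speed _hdom hpre
  unfold Spec_solution
  obtain ⟨hlen, hs⟩ := hpre
  by_cases hn : pro.length = 0
  · have hpro : pro = [] := List.length_eq_zero_iff.mp hn
    subst hpro
    rfl
  · have hA : solution pro speed
        = (((List.range pro.length).foldl (pvAstep speed) ([], pro, 1)).1.foldl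
            pvDstep PySem.Dict.empty).values := rfl
    have hB : solution_alt pro speed = ((pro.zip speed).foldl pvBstep ([], 0, none)).1 := rfl
    rw [hA, hB, pvZipRange pro speed hlen, List.foldl_map, pvOuterB pro speed pro.length,
      pvOuterA pro speed hlen hs pro.length (le_refl _)]
    simp only []
    have hpw : ((List.range pro.length).map
        (fun i => 1 + (pro.length : Int) * pvR pro speed (i + 1))).Pairwise (· ≤ ·) := by
      rw [List.pairwise_map]
      apply List.Pairwise.imp ?_ (List.pairwise_lt_range)
      intro i j hij
      have h1 : pvR pro speed (i + 1) ≤ pvR pro speed (j + 1) := pvR_mono' pro speed (by omega)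
      have h2 : (0 : Int) ≤ (pro.length : Int) := by positivity
      nlinarith
    rw [pvDictVals _ hpw]
    have hmm : (List.range pro.length).map
        (fun i => 1 + (pro.length : Int) * pvR pro speed (i + 1))
        = ((List.range pro.length).map (fun i => pvR pro speed (i + 1))).map
            (fun v => 1 + (pro.length : Int) * v) := by
      rw [List.map_map]
      rfl
    rw [hmm, pvGrp_map (fun v => 1 + (pro.length : Int) * v)
      (fun a b h => by
        have hne := pvNcast_ne pro.length hn
        have h2 : (pro.length : Int) * a = (pro.length : Int) * b := by linarith
        exact mul_left_cancel₀ hne h2)]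
    rw [pvBfold]
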